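-- pv_equiv track=rewrite | github.com/xiyan524/RepSum | rouge-test.py | tokens_to_ids
-- ===== SOURCE A (Python) =====
-- def tokens_to_ids(token_list1, token_list2):
--   ids = {}
--   out1 = []
--   out2 = []
--   for token in token_list1:
--     out1.append(ids.setdefault(token, len(ids)))
--   for token in token_list2:
--     out2.append(ids.setdefault(token, len(ids)))
--
--   return out1, out2
-- ===== SOURCE B (Python) =====
-- def tokens_to_ids(token_list1, token_list2):
--     # Build the vocabulary once (order-preserving dedup of list1 then list2),
--     # number it, then the outputs are pure lookups.
--     vocab = dict.fromkeys(token_list1 + token_list2)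
--     ids = {}
--     for i, t in enumerate(vocab):
--         ids[t] = i
--     out1 = [ids[t] for t in token_list1]
--     out2 = [ids[t] for t in token_list2]
--     return out1, out2
-- ===== Notes on version B (the rewrite author's own statement) =====
-- stated objective: alternative
-- what changed: Splits A's single interleaved assign-id-while-emitting setdefault loop into build-then-lookup: dedup the concatenated token lists into a vocabulary, number it once by enumeration, then produce both outputs as pure dict lookups.
import Mathlib
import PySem

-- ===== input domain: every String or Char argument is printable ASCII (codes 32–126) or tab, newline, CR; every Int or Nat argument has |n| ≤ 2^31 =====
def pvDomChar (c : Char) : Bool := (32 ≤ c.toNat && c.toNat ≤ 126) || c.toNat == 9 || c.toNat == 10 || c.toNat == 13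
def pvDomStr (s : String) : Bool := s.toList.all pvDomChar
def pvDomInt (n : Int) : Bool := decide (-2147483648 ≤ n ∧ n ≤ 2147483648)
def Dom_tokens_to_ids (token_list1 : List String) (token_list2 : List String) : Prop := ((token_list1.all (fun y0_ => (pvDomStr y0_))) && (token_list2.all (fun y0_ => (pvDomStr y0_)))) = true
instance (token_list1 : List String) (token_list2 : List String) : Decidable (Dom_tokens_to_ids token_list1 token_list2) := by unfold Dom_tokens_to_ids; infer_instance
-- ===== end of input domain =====

-- B splits A's interleaved assign-while-emitting loop into build-then-lookup: dedup the
-- concatenated input into a vocabulary, number it once, outputs are pure lookups (objective: alternative).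

-- ===== PORT A =====
-- loop body: out.append(ids.setdefault(token, len(ids)))  (len(ids) read before the update)
def pvStepA (p : PySem.Dict String Int × List Int) (token : String) : PySem.Dict String Int × List Int :=
  (p.1.setdefault token ((p.1.size : Int)), p.2 ++ [((p.1.get? token).getD ((p.1.size : Int)))])

def tokens_to_ids (token_list1 : List String) (token_list2 : List String) : List Int × List Int :=
  let ids : PySem.Dict String Int := PySem.Dict.empty
  let s1 := token_list1.foldl pvStepA (ids, ([] : List Int))
  let s2 := token_list2.foldl pvStepA (s1.1, ([] : List Int))
  (s1.2, s2.2)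

-- ===== PORT B =====
-- ids[t] in Source B cannot miss (every token is in vocab); ported as get? + getD 0, exact here
def tokens_to_ids_alt (token_list1 : List String) (token_list2 : List String) : List Int × List Int :=
  let vocab := PySem.List.dedup (token_list1 ++ token_list2)
  let ids : PySem.Dict String Int :=
    (PySem.List.enumerate vocab).foldl (fun d p => d.insert p.2 p.1) PySem.Dict.empty
  (token_list1.map (fun t => ((ids.get? t).getD 0)),
   token_list2.map (fun t => ((ids.get? t).getD 0)))

-- ===== PRECONDITION & SPEC =====
def Spec_tokens_to_ids (token_list1 : List String) (token_list2 : List String) (out : List Int × List Int) : Prop := out = tokens_to_ids_alt token_list1 token_list2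
instance (token_list1 : List String) (token_list2 : List String) (out : List Int × List Int) : Decidable (Spec_tokens_to_ids token_list1 token_list2 out) := by unfold Spec_tokens_to_ids; infer_instance

-- ===== CLAIM (what is proved, stated in full; the proofs are below) =====
def Claim_equal_tokens_to_ids : Prop := ∀ (token_list1 : List String) (token_list2 : List String), Dom_tokens_to_ids token_list1 token_list2 → Spec_tokens_to_ids token_list1 token_list2 (tokens_to_ids token_list1 token_list2)

-- ===== LEMMAS AND PROOFS =====

-- the id B assigns a token, relative to a vocabulary list
def pvId (vocab : List String) (t : String) : Int := (((PySem.List.index? vocab t).getD 0 : Nat) : Int)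

-- the dict A has built after processing the tokens xs
def pvDict (xs : List String) : PySem.Dict String Int :=
  xs.foldl (fun d t => d.setdefault t ((d.size : Int))) PySem.Dict.empty

theorem pvDict_append_singleton (xs : List String) (t : String) :
    pvDict (xs ++ [t]) = (pvDict xs).setdefault t (((pvDict xs).size : Int)) := by
  simp [pvDict, List.foldl_append]

-- ids are stable under extending the token stream on the right
theorem pvId_stable (l r : List String) (t : String) (h : t ∈ l) :
    pvId (PySem.List.dedup (l ++ r)) t = pvId (PySem.List.dedup l) t := by
  have hmem : t ∈ PySem.Set.ofList l := (PySem.Set.mem_ofList _ _).2 h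
  simp only [pvId, PySem.List.dedup_eq_ofList, PySem.Set.ofList_append,
    PySem.Set.update_eq_append_filter]
  rw [PySem.List.index?_append_of_mem _ hmem]

-- B's numbering dict, characterised
def pvBuild (vocab : List String) : PySem.Dict String Int :=
  (PySem.List.enumerate vocab).foldl (fun d p => d.insert p.2 p.1) PySem.Dict.empty

theorem pvBuild_char (vocab : List String) (hnd : vocab.Nodup) (t : String) :
    (pvBuild vocab).get? t = if t ∈ vocab then some (pvId vocab t) else none := by
  induction vocab using List.reverseRecOn with
  | nil => simp [pvBuild]
  | append_singleton vs u ih =>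
    have hvs : vs.Nodup := (List.nodup_append.1 hnd).1
    have hu : u ∉ vs := by
      have hd := (List.nodup_append.1 hnd).2.2
      intro hmem
      exact hd u hmem u (by simp) rfl
    have hfold : pvBuild (vs ++ [u]) = (pvBuild vs).insert u ((vs.length : Int)) := by
      simp [pvBuild, PySem.List.enumerate_append, List.foldl_append,
        PySem.List.enumerate_cons, PySem.List.enumerate_nil]
    rw [hfold, PySem.Dict.get?_insert, ih hvs]
    by_cases htu : t = u
    · subst htu
      have hidx : PySem.List.index? (vs ++ [t]) t = some vs.length :=
        PySem.List.index?_append_singleton_self _ _ hu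
      rw [if_pos rfl, if_pos (by simp)]
      simp only [pvId, hidx, Option.getD_some]
    · by_cases ht : t ∈ vs
      · have heq : pvId (vs ++ [u]) t = pvId vs t := by
          simp only [pvId]
          rw [PySem.List.index?_append_of_mem _ ht]
        rw [if_neg htu, if_pos ht, if_pos (by simp [ht]), heq]
      · simp [ht, htu]

theorem pvDict_char (xs : List String) :
    ((pvDict xs).size = (PySem.List.dedup xs).length) ∧
    ∀ t, (pvDict xs).get? t =
      if t ∈ xs then some (pvId (PySem.List.dedup xs) t) else none := by
  induction xs using List.reverseRecOn with
  | nil => simp [pvDict, PySem.Dict.get?_empty, PySem.Dict.size_empty]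
  | append_singleton xs u ih =>
    obtain ⟨hsize, hget⟩ := ih
    rw [pvDict_append_singleton]
    by_cases hu : u ∈ xs
    · have hc : (pvDict xs).contains u = true := by
        have := hget u
        rw [if_pos hu] at this
        by_contra hcon
        have : (pvDict xs).get? u = none :=
          (PySem.Dict.get?_eq_none_iff_contains _ _).2 (by simpa using hcon)
        simp_all
      rw [PySem.Dict.setdefault_of_contains _ _ hc]
      have hded : PySem.List.dedup (xs ++ [u]) = PySem.List.dedup xs := by
        simp only [PySem.List.dedup_eq_ofList, PySem.Set.ofList_append_singleton]
        exact PySem.Set.add_of_mem ((PySem.Set.mem_ofList _ _).2 hu)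
      refine ⟨by rw [hded]; exact hsize, fun t => ?_⟩
      rw [hget t, hded]
      by_cases ht : t ∈ xs
      · simp [ht]
      · have : t ∈ xs ++ [u] ↔ t = u := by simp [ht]
        by_cases htu : t = u
        · subst htu; simp_all
        · simp [ht, htu]
    · have hc : (pvDict xs).contains u = false := by
        have := hget u
        rw [if_neg hu] at this
        by_contra hcon
        have hc' : (pvDict xs).contains u = true := by simpa using hcon
        have := (PySem.Dict.get?_eq_none_iff_contains (pvDict xs) u).1 ‹(pvDict xs).get? u = none›
        simp_all
      rw [PySem.Dict.setdefault_of_not_contains _ _ hc]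
      have hnd : u ∉ PySem.Set.ofList xs := fun hmem => hu ((PySem.Set.mem_ofList _ _).1 hmem)
      have hded : PySem.List.dedup (xs ++ [u]) = PySem.List.dedup xs ++ [u] := by
        simp only [PySem.List.dedup_eq_ofList, PySem.Set.ofList_append_singleton]
        exact PySem.Set.add_of_not_mem hnd
      constructor
      · rw [hded]
        simp_all [PySem.Dict.size_insert]
      · intro t
        rw [PySem.Dict.get?_insert, hded]
        by_cases htu : t = u
        · subst htu
          rw [if_pos rfl, if_pos (by simp)]
          have hidx : PySem.List.index? (PySem.List.dedup xs ++ [t]) t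
              = some (PySem.List.dedup xs).length := by
            apply PySem.List.index?_append_singleton_self
            simpa [PySem.List.dedup_eq_ofList] using hnd
          simp only [pvId, hidx, Option.getD_some, hsize]
        · rw [if_neg htu, hget t]
          by_cases ht : t ∈ xs
          · have heq : pvId (PySem.List.dedup xs ++ [u]) t = pvId (PySem.List.dedup xs) t := by
              simp only [pvId]
              rw [PySem.List.index?_append_of_mem _ (by simpa [PySem.List.dedup_eq_ofList, PySem.Set.mem_ofList] using ht)]
            rw [if_pos ht, if_pos (by simp [ht]), heq]
          · simp [ht, htu]

-- the interleaved loop, characterised: it builds pvDict and emits B's ids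
theorem pvLoop (ys : List String) : ∀ (xs : List String) (acc : List Int),
    ys.foldl pvStepA (pvDict xs, acc)
      = (pvDict (xs ++ ys), acc ++ ys.map (pvId (PySem.List.dedup (xs ++ ys)))) := by
  induction ys with
  | nil => intro xs acc; simp
  | cons u ys ih =>
    intro xs acc
    have hstep : pvStepA (pvDict xs, acc) u
        = (pvDict (xs ++ [u]), acc ++ [pvId (PySem.List.dedup (xs ++ [u])) u]) := by
      obtain ⟨hsize, hget⟩ := pvDict_char xs
      simp only [pvStepA, pvDict_append_singleton]
      congr 1
      rw [hget u]
      by_cases hu : u ∈ xs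
      · have hded : PySem.List.dedup (xs ++ [u]) = PySem.List.dedup xs := by
          simp only [PySem.List.dedup_eq_ofList, PySem.Set.ofList_append_singleton]
          exact PySem.Set.add_of_mem ((PySem.Set.mem_ofList _ _).2 hu)
        rw [if_pos hu, hded]
        simp
      · have hnd : u ∉ PySem.Set.ofList xs := fun hmem => hu ((PySem.Set.mem_ofList _ _).1 hmem)
        have hded : PySem.List.dedup (xs ++ [u]) = PySem.List.dedup xs ++ [u] := by
          simp only [PySem.List.dedup_eq_ofList, PySem.Set.ofList_append_singleton]
          exact PySem.Set.add_of_not_mem hnd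
        have hidx : PySem.List.index? (PySem.List.dedup xs ++ [u]) u
            = some (PySem.List.dedup xs).length := by
          apply PySem.List.index?_append_singleton_self
          simpa [PySem.List.dedup_eq_ofList] using hnd
        rw [if_neg hu, hded]
        simp only [pvId, hidx, Option.getD_some, Option.getD_none, hsize]
    rw [List.foldl_cons, hstep, ih (xs ++ [u]) (acc ++ [pvId (PySem.List.dedup (xs ++ [u])) u])]
    have hxs : xs ++ [u] ++ ys = xs ++ u :: ys := by simp
    have hv : pvId (PySem.List.dedup (xs ++ u :: ys)) u = pvId (PySem.List.dedup (xs ++ [u])) u := by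
      have : xs ++ u :: ys = (xs ++ [u]) ++ ys := by simp
      rw [this]
      exact pvId_stable (xs ++ [u]) ys u (by simp)
    rw [hxs, List.map_cons, hv]
    simp

-- ===== VERDICT (by name: the statement is the Claim_ definition above) =====
theorem tokens_to_ids_spec : Claim_equal_tokens_to_ids := by
  intro l1 l2 _
  show tokens_to_ids l1 l2 = tokens_to_ids_alt l1 l2
  have hempty : (PySem.Dict.empty : PySem.Dict String Int) = pvDict [] := rfl
  have h1 := pvLoop l1 [] []
  have h2 := pvLoop l2 l1 []
  simp only [List.nil_append, List.nil_append] at h1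
  simp only [tokens_to_ids, hempty, h1, h2]
  simp only [tokens_to_ids_alt]
  have hnd : (PySem.List.dedup (l1 ++ l2)).Nodup := PySem.List.nodup_dedup _
  have hget : ∀ t, t ∈ l1 ++ l2 →
      (((pvBuild (PySem.List.dedup (l1 ++ l2))).get? t).getD 0)
        = pvId (PySem.List.dedup (l1 ++ l2)) t := by
    intro t ht
    rw [pvBuild_char _ hnd t, if_pos ((PySem.List.mem_dedup _ _).2 ht)]
    rfl
  refine Prod.ext ?_ ?_
  · show l1.map (pvId (PySem.List.dedup l1)) = l1.map _
    apply List.map_congr_left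
    intro t ht
    rw [show ((PySem.List.enumerate (PySem.List.dedup (l1 ++ l2))).foldl
        (fun d p => d.insert p.2 p.1) PySem.Dict.empty) = pvBuild (PySem.List.dedup (l1 ++ l2)) from rfl,
      hget t (by simp [ht]), pvId_stable l1 l2 t ht]
  · show l2.map (pvId (PySem.List.dedup (l1 ++ l2))) = l2.map _
    apply List.map_congr_left
    intro t ht
    rw [show ((PySem.List.enumerate (PySem.List.dedup (l1 ++ l2))).foldl
        (fun d p => d.insert p.2 p.1) PySem.Dict.empty) = pvBuild (PySem.List.dedup (l1 ++ l2)) from rfl,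
      hget t (by simp [ht])]
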